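-- pv_equiv track=rewrite | github.com/StephanAKoehler/label_analysis | label_analysis.py | trunc_list
-- ===== SOURCE A (Python) =====
-- def trunc_list( list_, list_for_truncating, include_intersect = True, count = -1 ):
--     last_i = None
--     if count < 0:
--         for i in reversed( range( len( list_ ) ) ):
--             if list_[i] in list_for_truncating:
--                 count += 1
--                 last_i = i
--                 if count == 0:
--                     break
--         if last_i != None:
--             if include_intersect:
--                 return list_[:last_i+1]
--             else:
--                 return list_[:last_i]
--         return list_
--     elif count > 0:
--         for i in range( len( list_ ) ):
--             if list_[i] in list_for_truncating:
--                 count -= 1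
--                 last_i = i
--                 if count == 0:
--                     break
--         if last_i != None:
--             if include_intersect:
--                 return list_[:last_i+1]
--             else:
--                 return list_[:last_i]
--         return list_
--     else:
--         return list_
-- ===== SOURCE B (Python) =====
-- def trunc_list(list_, list_for_truncating, include_intersect=True, count=-1):
--     if count == 0:
--         return list_
--     members = set(list_for_truncating)
--     hits = [i for i, x in enumerate(list_) if x in members]
--     if not hits:
--         return list_
--     if count > 0:
--         idx = hits[min(count - 1, len(hits) - 1)]
--     else:
--         idx = hits[max(len(hits) + count, 0)]
--     return list_[:idx + 1] if include_intersect else list_[:idx]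
-- ===== Notes on version B (the rewrite author's own statement) =====
-- stated objective: faster
-- what changed: A's two directional scan-count-and-break loops with an O(m) list membership test per element are replaced by one pass building the list of match positions against a set, then a single clamped index in closed form (min/max) and one slice.
import Mathlib
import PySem

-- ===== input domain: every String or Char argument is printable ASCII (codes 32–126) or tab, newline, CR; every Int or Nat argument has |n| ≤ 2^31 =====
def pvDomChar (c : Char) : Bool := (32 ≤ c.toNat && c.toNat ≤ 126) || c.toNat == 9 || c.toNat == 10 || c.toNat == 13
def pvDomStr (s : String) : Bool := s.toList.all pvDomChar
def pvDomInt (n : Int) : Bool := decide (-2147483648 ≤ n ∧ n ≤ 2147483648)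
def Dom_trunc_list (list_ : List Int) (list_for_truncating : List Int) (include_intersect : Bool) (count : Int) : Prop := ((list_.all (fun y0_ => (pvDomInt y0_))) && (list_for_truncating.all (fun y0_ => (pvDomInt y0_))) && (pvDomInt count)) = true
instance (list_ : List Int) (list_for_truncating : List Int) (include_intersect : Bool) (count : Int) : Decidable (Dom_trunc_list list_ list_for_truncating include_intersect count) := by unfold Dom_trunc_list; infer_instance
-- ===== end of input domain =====

-- B replaces A's two scan-count-and-break loops by one table of match positions plus a
-- closed-form clamped index selection over a set (objective: faster, O(n+m) vs O(n·m)); same return value everywhere.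

-- ===== PORT A =====
-- 'list_[i] in list_for_truncating': list_[i] ported as pyGetD list_ i 0 (every i comes from
-- range(len(list_)), so it is always in range and the default 0 is never read).
def truncHit (list_ lft : List Int) (i : Int) : Bool :=
  lft.contains (PySem.List.pyGetD list_ i 0)

-- A's backward loop (count < 0): 'for i in reversed(range(len(list_)))' with count += 1,
-- last_i := i, break when count == 0.
def truncLoopNeg (list_ lft : List Int) : List Int → Int → Option Int → Int × Option Int
  | [], c, li => (c, li)
  | i :: rest, c, li =>
    if truncHit list_ lft i then
      if c + 1 = 0 then (c + 1, some i) else truncLoopNeg list_ lft rest (c + 1) (some i)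
    else truncLoopNeg list_ lft rest c li

-- A's forward loop (count > 0): count -= 1, last_i := i, break when count == 0.
def truncLoopPos (list_ lft : List Int) : List Int → Int → Option Int → Int × Option Int
  | [], c, li => (c, li)
  | i :: rest, c, li =>
    if truncHit list_ lft i then
      if c - 1 = 0 then (c - 1, some i) else truncLoopPos list_ lft rest (c - 1) (some i)
    else truncLoopPos list_ lft rest c li

-- list_[:k] with 0 ≤ k is exactly List.take k.toNat (the indices i come from range(len), so 0 ≤ i).
def trunc_list (list_ : List Int) (list_for_truncating : List Int) (include_intersect : Bool) (count : Int) : List Int :=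
  if count < 0 then
    match (truncLoopNeg list_ list_for_truncating
        ((PySem.List.pyRange 0 (PySem.List.len list_)).reverse) count none).2 with
    | some i => if include_intersect then list_.take (i + 1).toNat else list_.take i.toNat
    | none => list_
  else if count > 0 then
    match (truncLoopPos list_ list_for_truncating
        (PySem.List.pyRange 0 (PySem.List.len list_)) count none).2 with
    | some i => if include_intersect then list_.take (i + 1).toNat else list_.take i.toNat
    | none => list_
  else list_

-- ===== PORT B =====
-- hits[k] is ported as getD k 0: the selected position is always in range (hits ≠ []).
def trunc_list_alt (list_ : List Int) (list_for_truncating : List Int) (include_intersect : Bool) (count : Int) : List Int :=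
  if count = 0 then list_
  else
    let members := PySem.Set.ofList list_for_truncating
    let hits := ((PySem.List.enumerate list_).filter
      (fun p => PySem.Set.contains members p.2)).map (·.1)
    if hits.isEmpty then list_
    else
      let idx : Int :=
        if count > 0 then hits.getD (min (count - 1) ((hits.length : Int) - 1)).toNat 0
        else hits.getD (max ((hits.length : Int) + count) 0).toNat 0
      if include_intersect then list_.take (idx + 1).toNat else list_.take idx.toNat

-- ===== PRECONDITION & SPEC =====
def Spec_trunc_list (list_ : List Int) (list_for_truncating : List Int) (include_intersect : Bool) (count : Int) (out : List Int) : Prop := out = trunc_list_alt list_ list_for_truncating include_intersect count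
instance (list_ : List Int) (list_for_truncating : List Int) (include_intersect : Bool) (count : Int) (out : List Int) : Decidable (Spec_trunc_list list_ list_for_truncating include_intersect count out) := by unfold Spec_trunc_list; infer_instance

-- ===== CLAIM (what is proved, stated in full; the proofs are below) =====
def Claim_equal_trunc_list : Prop := ∀ (list_ : List Int) (list_for_truncating : List Int) (include_intersect : Bool) (count : Int), Dom_trunc_list list_ list_for_truncating include_intersect count → Spec_trunc_list list_ list_for_truncating include_intersect count (trunc_list list_ list_for_truncating include_intersect count)

-- ===== LEMMAS AND PROOFS =====

-- A's forward loop, characterised by the filtered match list m.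
theorem truncLoopPos_spec (list_ lft : List Int) (idxs : List Int) (c : Int) (li : Option Int)
    (hc : 0 < c) :
    truncLoopPos list_ lft idxs c li =
      (let m := idxs.filter (truncHit list_ lft);
       if (m.length : Int) < c then (c - m.length, if m.isEmpty then li else m[m.length - 1]?)
       else (0, m[(c - 1).toNat]?)) := by
  induction idxs generalizing c li with
  | nil => simp [truncLoopPos]; omega
  | cons i rest ih =>
    by_cases hm : truncHit list_ lft i = true
    · have hf : (i :: rest).filter (truncHit list_ lft)
          = i :: rest.filter (truncHit list_ lft) := by
        rw [List.filter_cons, if_pos hm]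
      rw [truncLoopPos, if_pos hm, hf]
      set m' := rest.filter (truncHit list_ lft) with hm'
      by_cases h1 : c = 1
      · subst h1
        rw [if_pos (show (1:Int) - 1 = 0 by omega),
          if_neg (show ¬ ((((i :: m').length : Nat) : Int) < 1) by
            simp only [List.length_cons]; push_cast; omega)]
        simp
      · have hc' : 0 < c - 1 := by omega
        rw [if_neg (show ¬ (c - 1 = 0) by omega), ih _ _ hc']
        simp only [List.length_cons]
        by_cases hlen : (m'.length : Int) < c - 1
        · rw [if_pos hlen, if_pos (show ((m'.length + 1 : Nat) : Int) < c by push_cast; omega)]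
          cases m' with
          | nil => simp
          | cons a t =>
            simp only [List.isEmpty_cons, Bool.false_eq_true, if_neg (by simp : ¬ False)]
            refine Prod.ext ?_ ?_
            · simp only; push_cast; ring
            · simp only [List.length_cons, Nat.add_sub_cancel]
              rw [List.getElem?_cons_succ]
        · rw [if_neg hlen, if_neg (show ¬ (((m'.length + 1 : Nat) : Int) < c) by push_cast; omega)]
          have h2 : (c - 1).toNat = (c - 1 - 1).toNat + 1 := by omega
          rw [h2, List.getElem?_cons_succ]
    · have hf : (i :: rest).filter (truncHit list_ lft)
          = rest.filter (truncHit list_ lft) := by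
        rw [List.filter_cons, if_neg hm]
      rw [truncLoopPos, if_neg hm, hf, ih _ _ hc]

-- A's backward loop, same shape with count running up to 0.
theorem truncLoopNeg_spec (list_ lft : List Int) (idxs : List Int) (c : Int) (li : Option Int)
    (hc : c < 0) :
    truncLoopNeg list_ lft idxs c li =
      (let m := idxs.filter (truncHit list_ lft);
       if (m.length : Int) < -c then (c + m.length, if m.isEmpty then li else m[m.length - 1]?)
       else (0, m[(-c - 1).toNat]?)) := by
  induction idxs generalizing c li with
  | nil => simp [truncLoopNeg]; omega
  | cons i rest ih =>
    by_cases hm : truncHit list_ lft i = true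
    · have hf : (i :: rest).filter (truncHit list_ lft)
          = i :: rest.filter (truncHit list_ lft) := by
        rw [List.filter_cons, if_pos hm]
      rw [truncLoopNeg, if_pos hm, hf]
      set m' := rest.filter (truncHit list_ lft) with hm'
      by_cases h1 : c = -1
      · subst h1
        rw [if_pos (show (-1 : Int) + 1 = 0 by omega),
          if_neg (show ¬ ((((i :: m').length : Nat) : Int) < -(-1 : Int)) by
            simp only [List.length_cons]; push_cast; omega)]
        simp
      · have hc' : c + 1 < 0 := by omega
        rw [if_neg (show ¬ (c + 1 = 0) by omega), ih _ _ hc']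
        simp only [List.length_cons]
        by_cases hlen : (m'.length : Int) < -(c + 1)
        · rw [if_pos hlen, if_pos (show ((m'.length + 1 : Nat) : Int) < -c by push_cast; omega)]
          cases m' with
          | nil => simp
          | cons a t =>
            simp only [List.isEmpty_cons, Bool.false_eq_true, if_neg (by simp : ¬ False)]
            refine Prod.ext ?_ ?_
            · simp only; push_cast; ring
            · simp only [List.length_cons, Nat.add_sub_cancel]
              rw [List.getElem?_cons_succ]
        · rw [if_neg hlen,
            if_neg (show ¬ (((m'.length + 1 : Nat) : Int) < -c) by push_cast; omega)]
          have h2 : (-c - 1).toNat = (-(c + 1) - 1).toNat + 1 := by omega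
          rw [h2, List.getElem?_cons_succ]
    · have hf : (i :: rest).filter (truncHit list_ lft)
          = rest.filter (truncHit list_ lft) := by
        rw [List.filter_cons, if_neg hm]
      rw [truncLoopNeg, if_neg hm, hf, ih _ _ hc]

-- B's hits list equals A's filtered index range.
theorem hits_eq (list_ lft : List Int) :
    ((PySem.List.enumerate list_).filter
      (fun p => PySem.Set.contains (PySem.Set.ofList lft) p.2)).map (·.1) =
    (PySem.List.pyRange 0 (PySem.List.len list_)).filter (truncHit list_ lft) := by
  rw [PySem.List.enumerate_eq_map_pyRange list_ 0, List.filter_map, List.map_map]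
  have hpred : ((fun p : Int × Int => PySem.Set.contains (PySem.Set.ofList lft) p.2) ∘
      (fun j => (j, PySem.List.pyGetD list_ j 0))) = truncHit list_ lft := by
    funext j
    simp [truncHit, PySem.Set.contains, PySem.Set.mem_ofList]
  rw [hpred]
  simp [Function.comp_def]

-- ===== VERDICT (by name: the statement is the Claim_ definition above) =====
theorem trunc_list_spec : Claim_equal_trunc_list := by
  intro list_ lft inc count _
  unfold Spec_trunc_list trunc_list trunc_list_alt
  by_cases h0 : count = 0
  · subst h0; norm_num
  by_cases hpos : count > 0
  · rw [if_neg (show ¬ count < 0 by omega), if_pos hpos, if_neg h0,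
      truncLoopPos_spec list_ lft _ count none hpos]
    simp only [hits_eq, if_pos hpos]
    set F := (PySem.List.pyRange 0 (PySem.List.len list_)).filter (truncHit list_ lft) with hF
    by_cases hFe : F.isEmpty = true
    · have hFnil := List.isEmpty_iff.mp hFe
      rw [if_pos hFe, hFnil]
      simp [show (0:Int) < count by omega]
    · have hne : F ≠ [] := fun h => hFe (List.isEmpty_iff.mpr h)
      have hlen : 0 < F.length := List.length_pos_iff.mpr hne
      by_cases hlt : (F.length : Int) < count
      · rw [if_pos hlt, if_neg hFe, if_neg hFe,
          List.getElem?_eq_getElem (show F.length - 1 < F.length by omega),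
          min_eq_right (show (F.length : Int) - 1 ≤ count - 1 by omega),
          show ((F.length : Int) - 1).toNat = F.length - 1 by omega,
          List.getD_eq_getElem?_getD,
          List.getElem?_eq_getElem (show F.length - 1 < F.length by omega)]
        simp
      · rw [if_neg hlt, if_neg hFe,
          min_eq_left (show count - 1 ≤ (F.length : Int) - 1 by omega),
          List.getElem?_eq_getElem (show (count - 1).toNat < F.length by omega),
          List.getD_eq_getElem?_getD,
          List.getElem?_eq_getElem (show (count - 1).toNat < F.length by omega)]
        simp
  · have hneg : count < 0 := by omega
    rw [if_pos hneg, if_neg h0,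
      truncLoopNeg_spec list_ lft _ count none hneg, List.filter_reverse]
    simp only [hits_eq, if_neg hpos, List.isEmpty_reverse, List.length_reverse]
    set F := (PySem.List.pyRange 0 (PySem.List.len list_)).filter (truncHit list_ lft) with hF
    by_cases hFe : F.isEmpty = true
    · have hFnil := List.isEmpty_iff.mp hFe
      rw [if_pos hFe, hFnil]
      simp [hneg]
    · have hne : F ≠ [] := fun h => hFe (List.isEmpty_iff.mpr h)
      have hlen : 0 < F.length := List.length_pos_iff.mpr hne
      by_cases hlt : (F.length : Int) < -count
      · rw [if_pos hlt, if_neg hFe, if_neg hFe,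
          List.getElem?_reverse (show F.length - 1 < F.length by omega),
          show F.length - 1 - (F.length - 1) = 0 by omega,
          List.getElem?_eq_getElem hlen,
          max_eq_right (show (F.length : Int) + count ≤ 0 by omega),
          show ((0:Int)).toNat = 0 by omega,
          List.getD_eq_getElem?_getD,
          List.getElem?_eq_getElem hlen]
        simp
      · rw [if_neg hlt, if_neg hFe,
          List.getElem?_reverse (show (-count - 1).toNat < F.length by omega),
          show F.length - 1 - (-count - 1).toNat = ((F.length : Int) + count).toNat by omega,
          max_eq_left (show (0:Int) ≤ (F.length : Int) + count by omega),
          List.getElem?_eq_getElem (show ((F.length : Int) + count).toNat < F.length by omega),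
          List.getD_eq_getElem?_getD,
          List.getElem?_eq_getElem (show ((F.length : Int) + count).toNat < F.length by omega)]
        simp
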